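-- pv_equiv track=rewrite | github.com/GogolevaSasha/Open-answers_coder_bot | bot.py | columns_letter_map
-- ===== SOURCE A (Python) =====
-- import string
-- from typing import Any, List, Tuple
--
-- def columns_letter_map(cols: List[str]) -> List[Tuple[str, str]]:
--     letters = list(string.ascii_uppercase)
--     pairs: List[Tuple[str, str]] = []
--     for i, col in enumerate(cols):
--         if i < len(letters):
--             pairs.append((letters[i], col))
--         else:
--             a = letters[(i // 26) - 1]
--             b = letters[i % 26]
--             pairs.append((a + b, col))
--     return pairs
-- ===== SOURCE B (Python) =====
-- import string
-- from typing import List, Tuple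
--
-- def _labels():
--     yield from string.ascii_uppercase
--     for a in string.ascii_uppercase:
--         for b in string.ascii_uppercase:
--             yield a + b
--
-- def columns_letter_map(cols: List[str]) -> List[Tuple[str, str]]:
--     return list(zip(_labels(), cols))
-- ===== Notes on version B (the rewrite author's own statement) =====
-- stated objective: alternative
-- what changed: B generates the label sequence A..Z then AA..ZZ once (generator) and zips it against the columns, replacing A's enumerate loop with per-element if/else index arithmetic into the letters list.
import Mathlib
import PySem

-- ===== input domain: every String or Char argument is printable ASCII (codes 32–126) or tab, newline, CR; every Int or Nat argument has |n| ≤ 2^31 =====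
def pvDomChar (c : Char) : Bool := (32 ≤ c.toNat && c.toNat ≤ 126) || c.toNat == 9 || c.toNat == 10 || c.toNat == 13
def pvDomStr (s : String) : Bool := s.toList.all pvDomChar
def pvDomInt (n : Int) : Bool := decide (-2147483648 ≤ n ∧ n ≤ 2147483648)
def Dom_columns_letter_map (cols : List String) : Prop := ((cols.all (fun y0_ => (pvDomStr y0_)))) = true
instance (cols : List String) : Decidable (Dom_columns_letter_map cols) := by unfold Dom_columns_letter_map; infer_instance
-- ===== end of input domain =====

-- B zips a once-generated label sequence (A..Z then AA..ZZ) against the columns instead of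
-- A's enumerate loop with per-element if/else index arithmetic (alternative decomposition, same cost).

-- ===== PORT A =====
-- letters = list(string.ascii_uppercase)
def lettersA : List String :=
  ["A","B","C","D","E","F","G","H","I","J","K","L","M",
   "N","O","P","Q","R","S","T","U","V","W","X","Y","Z"]

def columns_letter_map (cols : List String) : List (String × String) :=
  (PySem.List.enumerate cols 0).foldl (fun pairs ic =>
    if ic.1 < (lettersA.length : Int) then
      pairs ++ [(PySem.List.pyGetD lettersA ic.1 "", ic.2)]
    else
      pairs ++ [((PySem.List.pyGetD lettersA (PySem.Int.floordiv ic.1 26 - 1) "") ++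
                 (PySem.List.pyGetD lettersA (PySem.Int.mod ic.1 26) ""), ic.2)]) []

-- ===== PORT B =====
-- string.ascii_uppercase (the characters _labels yields from / iterates over)
def lettersB : List String :=
  ["A","B","C","D","E","F","G","H","I","J","K","L","M",
   "N","O","P","Q","R","S","T","U","V","W","X","Y","Z"]

-- the sequence produced by the generator _labels(): A..Z, then a+b for each a, b
def labelsSeq : List String :=
  lettersB ++ lettersB.flatMap (fun a => lettersB.map (fun b => a ++ b))

-- list(zip(_labels(), cols))
def columns_letter_map_alt (cols : List String) : List (String × String) :=
  labelsSeq.zip cols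

-- ===== PRECONDITION & SPEC =====
-- A raises IndexError at column index 702 (letters[(702//26)-1] = letters[26]), so only lists of
-- at most 702 columns are admitted (B's zip would silently truncate there instead).
def Pre_columns_letter_map (cols : List String) : Prop := cols.length ≤ 702
instance (cols : List String) : Decidable (Pre_columns_letter_map cols) := by unfold Pre_columns_letter_map; infer_instance
def pvWitness_columns_letter_map : List String := ["name", "score"]

def Spec_columns_letter_map (cols : List String) (out : List (String × String)) : Prop := out = columns_letter_map_alt cols
instance (cols : List String) (out : List (String × String)) : Decidable (Spec_columns_letter_map cols out) := by unfold Spec_columns_letter_map; infer_instance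

-- ===== CLAIM (what is proved, stated in full; the proofs are below) =====
def Claim_equal_columns_letter_map : Prop := ∀ (cols : List String), Dom_columns_letter_map cols → Pre_columns_letter_map cols → Spec_columns_letter_map cols (columns_letter_map cols)

-- ===== LEMMAS AND PROOFS =====

-- a foldl that appends one element in each branch of an if is a map
theorem foldl_if_append {α β : Type} (c : α → Prop) [DecidablePred c] (f g : α → β)
    (l : List α) (acc : List β) :
    l.foldl (fun acc x => if c x then acc ++ [f x] else acc ++ [g x]) acc =
      acc ++ l.map (fun x => if c x then f x else g x) := by
  induction l generalizing acc with
  | nil => simp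
  | cons x t ih =>
    simp only [List.foldl_cons, List.map_cons]
    by_cases hx : c x
    · rw [if_pos hx, if_pos hx, ih]; simp
    · rw [if_neg hx, if_neg hx, ih]; simp

-- indexing the cartesian-product block of B's label sequence (stated for inner length 26, the only use)
theorem getD_flatMap_map {α β : Type} (l m : List α) (f : α → α → β) (j : Nat)
    (hn : m.length = 26) (hj : j < l.length * 26) (da : α) (db : β) :
    (l.flatMap fun a => m.map (f a)).getD j db =
      f (l.getD (j / 26) da) (m.getD (j % 26) da) := by
  induction l generalizing j with
  | nil => simp at hj
  | cons a t ih =>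
    simp only [List.flatMap_cons]
    by_cases h : j < 26
    · have h1 : j / 26 = 0 := by omega
      have h2 : j % 26 = j := by omega
      rw [List.getD_append _ _ _ _ (by simp [hn]; omega), h1, h2]
      have hjm : j < (m.map (f a)).length := by simp [hn]; omega
      rw [List.getD_eq_getElem _ _ hjm, List.getElem_map,
          List.getD_eq_getElem _ _ (by omega : j < m.length)]
      rfl
    · rw [not_lt] at h
      have hlen : (m.map (f a)).length = 26 := by simp [hn]
      rw [List.getD_append_right _ _ _ _ (by omega), hlen]
      have hj' : j - 26 < t.length * 26 := by
        simp only [List.length_cons, Nat.succ_mul] at hj; omega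
      rw [ih (j - 26) hj']
      have e1 : (j - 26) / 26 = j / 26 - 1 := by omega
      have e2 : (j - 26) % 26 = j % 26 := by omega
      rw [e1, e2]
      congr 1
      cases hq : j / 26 with
      | zero => omega
      | succ q => simp

set_option maxRecDepth 4000 in
theorem labelsSeq_len : labelsSeq.length = 702 := rfl
theorem lettersA_eq_lettersB : lettersA = lettersB := rfl
theorem lettersA_len : lettersA.length = 26 := rfl

theorem label_small (k : Nat) (hk : k < 26) :
    PySem.List.pyGetD lettersA (k : Int) "" = labelsSeq.getD k "" := by
  rw [PySem.List.pyGetD_natCast, labelsSeq,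
      List.getD_append _ _ _ _ (by simpa [lettersA_eq_lettersB] using hk : k < lettersB.length),
      lettersA_eq_lettersB]

theorem label_large (k : Nat) (h1 : 26 ≤ k) (h2 : k < 702) :
    (PySem.List.pyGetD lettersA (PySem.Int.floordiv (k : Int) 26 - 1) "") ++
      (PySem.List.pyGetD lettersA (PySem.Int.mod (k : Int) 26) "") =
    labelsSeq.getD k "" := by
  have h26 : ((26 : Nat) : Int) = (26 : Int) := by norm_num
  have ef : PySem.Int.floordiv (k : Int) 26 - 1 = ((k / 26 - 1 : Nat) : Int) := by
    rw [← h26, PySem.Int.floordiv_natCast]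
    have : 1 ≤ k / 26 := Nat.one_le_div_iff (by norm_num) |>.mpr h1
    push_cast [this]; ring
  have em : PySem.Int.mod (k : Int) 26 = ((k % 26 : Nat) : Int) := by
    rw [← h26, PySem.Int.mod_natCast]
  rw [ef, em, PySem.List.pyGetD_natCast, PySem.List.pyGetD_natCast, labelsSeq]
  have hlb : lettersB.length = 26 := rfl
  rw [List.getD_append_right _ _ _ _ (by omega : lettersB.length ≤ k)]
  rw [getD_flatMap_map lettersB lettersB (fun a b => a ++ b) (k - lettersB.length)
        hlb (by rw [hlb]; omega) "" ""]
  have e1 : (k - lettersB.length) / 26 = k / 26 - 1 := by rw [hlb]; omega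
  have e2 : (k - lettersB.length) % 26 = k % 26 := by rw [hlb]; omega
  rw [e1, e2, lettersA_eq_lettersB]

-- ===== VERDICT (by name: the statement is the Claim_ definition above) =====
theorem columns_letter_map_spec : Claim_equal_columns_letter_map := by
  intro cols _ hpre
  unfold Spec_columns_letter_map columns_letter_map columns_letter_map_alt
  rw [foldl_if_append (fun ic : Int × String => ic.1 < (lettersA.length : Int))
        (fun ic => (PySem.List.pyGetD lettersA ic.1 "", ic.2))
        (fun ic => ((PySem.List.pyGetD lettersA (PySem.Int.floordiv ic.1 26 - 1) "") ++
                    (PySem.List.pyGetD lettersA (PySem.Int.mod ic.1 26) ""), ic.2))]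
  rw [List.nil_append]
  apply List.ext_getElem
  · simp [PySem.List.length_enumerate, List.length_zip, labelsSeq_len]
    exact hpre
  · intro k h1 h2
    rw [List.getElem_map, PySem.List.getElem_enumerate, List.getElem_zip]
    have hkc : k < cols.length := by simpa [PySem.List.length_enumerate] using h1
    have hk702 : k < 702 := lt_of_lt_of_le hkc hpre
    have hg : labelsSeq[k]'(by rw [labelsSeq_len]; exact hk702) = labelsSeq.getD k "" :=
      (List.getD_eq_getElem _ _ _).symm
    simp only [zero_add]
    by_cases hc : ((k : Int)) < (lettersA.length : Int)
    · rw [if_pos hc, hg, label_small k (by exact_mod_cast (lettersA_len ▸ hc))]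
    · rw [if_neg hc]
      have hge : 26 ≤ k := by
        rw [lettersA_len] at hc; exact_mod_cast not_lt.mp hc
      rw [Prod.mk.injEq, hg]
      exact ⟨label_large k hge hk702, rfl⟩
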